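-- pv_equiv track=rewrite | github.com/AmoghM/Reinforcement-Learning-Trade-Strategies | src/data_process.py | get_all_states
-- ===== SOURCE A (Python) =====
-- def get_all_states(percent_b_states_values, close_sma_ratio_states_value, cash_states_values, shares_states_values):
--     '''
--     Combine all the states from the discretized
--     norm_adj_close, norm_close_sma_ratio columns.
--     Inputs:
--     price_states_value(dict)
--     bb_states_value(dict)
--     close_sma_ratio_states_value(dict)
--     Output:
--     states(list): list of strings
--     '''
--     states = []
--     for c, _ in close_sma_ratio_states_value.items():
--         for b, _ in percent_b_states_values.items():
--           for m, _ in cash_states_values.items():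
--             for s, _ in shares_states_values.items():
--               state =  str(c) + str(b) + str(m) + str(s)
--               states.append(str(state))
--
--     return states
-- ===== SOURCE B (Python) =====
-- def get_all_states(percent_b_states_values, close_sma_ratio_states_value, cash_states_values, shares_states_values):
--     acc = ['']
--     for d in (close_sma_ratio_states_value, percent_b_states_values, cash_states_values, shares_states_values):
--         acc = [prefix + str(k) for prefix in acc for k in d]
--     return acc
-- ===== Notes on version B (the rewrite author's own statement) =====
-- stated objective: alternative
-- what changed: Replaces the four fixed nested loops with a fold over the ordered list of the four dicts, growing a list of partial prefix strings one dimension at a time.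
import Mathlib
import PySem

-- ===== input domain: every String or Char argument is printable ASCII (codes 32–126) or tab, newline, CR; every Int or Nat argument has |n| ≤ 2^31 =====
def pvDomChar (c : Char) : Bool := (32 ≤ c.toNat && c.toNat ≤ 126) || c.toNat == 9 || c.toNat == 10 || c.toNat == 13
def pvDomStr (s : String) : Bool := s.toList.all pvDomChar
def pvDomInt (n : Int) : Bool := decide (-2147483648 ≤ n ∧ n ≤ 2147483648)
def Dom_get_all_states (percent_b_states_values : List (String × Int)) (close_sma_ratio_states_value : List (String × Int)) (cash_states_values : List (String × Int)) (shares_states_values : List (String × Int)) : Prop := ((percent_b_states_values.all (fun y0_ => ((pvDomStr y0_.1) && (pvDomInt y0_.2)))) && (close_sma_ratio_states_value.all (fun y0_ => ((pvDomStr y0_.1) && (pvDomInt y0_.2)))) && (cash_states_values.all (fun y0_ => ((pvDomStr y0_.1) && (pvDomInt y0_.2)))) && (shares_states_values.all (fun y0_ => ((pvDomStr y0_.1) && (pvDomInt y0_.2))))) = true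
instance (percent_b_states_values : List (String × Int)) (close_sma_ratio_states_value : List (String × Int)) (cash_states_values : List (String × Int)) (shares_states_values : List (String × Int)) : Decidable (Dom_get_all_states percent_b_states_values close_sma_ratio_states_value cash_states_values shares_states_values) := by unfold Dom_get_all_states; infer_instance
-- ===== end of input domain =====

-- ===== PORT A =====
-- A: four nested for-loops over the dicts' keys, appending one concatenated state per tuple.
def get_all_states (percent_b_states_values : List (String × Int)) (close_sma_ratio_states_value : List (String × Int)) (cash_states_values : List (String × Int)) (shares_states_values : List (String × Int)) : List String :=
  close_sma_ratio_states_value.foldl (fun states c =>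
    percent_b_states_values.foldl (fun states b =>
      cash_states_values.foldl (fun states m =>
        shares_states_values.foldl (fun states s =>
          states ++ [((c.1 ++ b.1) ++ m.1) ++ s.1]) states) states) states) []

-- ===== PORT B =====
-- B: fold over the ordered list of the four dicts, extending a list of prefix strings per dimension.
def get_all_states_alt (percent_b_states_values : List (String × Int)) (close_sma_ratio_states_value : List (String × Int)) (cash_states_values : List (String × Int)) (shares_states_values : List (String × Int)) : List String :=
  [close_sma_ratio_states_value, percent_b_states_values, cash_states_values, shares_states_values].foldl
    (fun acc d => acc.flatMap (fun pre => d.map (fun kv => pre ++ kv.1))) [""]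

-- ===== PRECONDITION & SPEC =====
def Spec_get_all_states (percent_b_states_values : List (String × Int)) (close_sma_ratio_states_value : List (String × Int)) (cash_states_values : List (String × Int)) (shares_states_values : List (String × Int)) (out : List String) : Prop := out = get_all_states_alt percent_b_states_values close_sma_ratio_states_value cash_states_values shares_states_values
instance (percent_b_states_values : List (String × Int)) (close_sma_ratio_states_value : List (String × Int)) (cash_states_values : List (String × Int)) (shares_states_values : List (String × Int)) (out : List String) : Decidable (Spec_get_all_states percent_b_states_values close_sma_ratio_states_value cash_states_values shares_states_values out) := by unfold Spec_get_all_states; infer_instance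

-- ===== CLAIM (what is proved, stated in full; the proofs are below) =====
def Claim_equal_get_all_states : Prop := ∀ (percent_b_states_values : List (String × Int)) (close_sma_ratio_states_value : List (String × Int)) (cash_states_values : List (String × Int)) (shares_states_values : List (String × Int)), Dom_get_all_states percent_b_states_values close_sma_ratio_states_value cash_states_values shares_states_values → Spec_get_all_states percent_b_states_values close_sma_ratio_states_value cash_states_values shares_states_values (get_all_states percent_b_states_values close_sma_ratio_states_value cash_states_values shares_states_values)

-- ===== LEMMAS AND PROOFS =====
theorem foldl_acc_append {α : Type} (f : α → List String) :
    ∀ (l : List α) (acc : List String),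
      l.foldl (fun s x => s ++ f x) acc = acc ++ l.flatMap f := by
  intro l
  induction l with
  | nil => simp
  | cons x xs ih => intro acc; simp [List.foldl_cons, ih]

-- ===== VERDICT (by name: the statement is the Claim_ definition above) =====
theorem flatMap_singleton_eq_map {α β : Type} (f : α → β) :
    ∀ (l : List α), l.flatMap (fun x => [f x]) = l.map f := by
  intro l; induction l with
  | nil => rfl
  | cons x xs ih => simp [List.flatMap_cons, ih]

theorem get_all_states_spec : Claim_equal_get_all_states := by
  intro pb cl ca sh _
  unfold Spec_get_all_states get_all_states get_all_states_alt
  simp only [foldl_acc_append, List.foldl_cons, List.foldl_nil]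
  simp [List.flatMap_map, List.flatMap_assoc, String.append_assoc, flatMap_singleton_eq_map]
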